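-- pv_equiv track=rewrite | github.com/Dpowell97/Dpowell97.github.io | Coding Portfolio/Intro to Programming Fall 2018 (Python)/IT101_Powell_Ch7Proj3_1.00.py | _determine_distance_
-- ===== SOURCE A (Python) =====
-- def _determine_distance_(level):
--     """Function to determine the distance of line to draw"""
--
--     #Local Declarations------------------------------------
--     distance = 200 #Variable to store the distance of the line to be drawn
--     #Local Statements--------------------------------------
--
--     #If else statement to determine which operations to be performed to
--     # to determine the distance
--     if level == 0:
--
--         return distance
--
--     else:
--
--         #For loop the shorten the distance by 1/3 each level
--         for i in range(level):
--
--             distance //= 3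
--
--         return distance
-- ===== SOURCE B (Python) =====
-- def _determine_distance_(level):
--     """Closed form: iterated floor division by 3 equals one floor division by 3**level."""
--     if level <= 0:
--         return 200
--     return 200 // 3 ** level
-- ===== Notes on version B (the rewrite author's own statement) =====
-- stated objective: simpler
-- what changed: Replaced the per-level loop of repeated //=3 with the closed form 200 // 3**level (guarding level <= 0, where A's range is empty and 200 is returned).
import Mathlib
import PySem

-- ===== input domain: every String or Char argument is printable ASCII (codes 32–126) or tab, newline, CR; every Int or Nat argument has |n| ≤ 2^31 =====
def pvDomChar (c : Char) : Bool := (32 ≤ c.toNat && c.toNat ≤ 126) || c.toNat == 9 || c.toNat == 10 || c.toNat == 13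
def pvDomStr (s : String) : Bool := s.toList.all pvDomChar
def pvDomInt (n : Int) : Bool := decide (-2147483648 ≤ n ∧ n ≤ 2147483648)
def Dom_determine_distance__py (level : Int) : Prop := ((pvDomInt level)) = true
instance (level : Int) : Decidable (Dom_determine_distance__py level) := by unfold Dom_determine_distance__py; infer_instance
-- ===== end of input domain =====

-- ===== PORT A =====
def determine_distance__py (level : Int) : Int :=
  if level == 0 then 200
  else (PySem.List.pyRange 0 level 1).foldl (fun distance _ => PySem.Int.floordiv distance 3) 200

-- ===== PORT B =====
-- B: closed form 200 // 3**level with a level <= 0 guard (header objective: simpler)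
def determine_distance__py_alt (level : Int) : Int :=
  if level ≤ 0 then 200
  else PySem.Int.floordiv 200 (3 ^ level.toNat)

-- ===== PRECONDITION & SPEC =====
def Spec_determine_distance__py (level : Int) (out : Int) : Prop := out = determine_distance__py_alt level
instance (level : Int) (out : Int) : Decidable (Spec_determine_distance__py level out) := by unfold Spec_determine_distance__py; infer_instance

-- ===== CLAIM (what is proved, stated in full; the proofs are below) =====
def Claim_equal_determine_distance__py : Prop := ∀ (level : Int), Dom_determine_distance__py level → Spec_determine_distance__py level (determine_distance__py level)

-- ===== LEMMAS AND PROOFS =====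

-- ===== VERDICT (by name: the statement is the Claim_ definition above) =====
lemma pv_fold_pow (n : Nat) :
    (PySem.List.pyRange 0 (n : Int) 1).foldl (fun d _ => PySem.Int.floordiv d 3) 200
      = PySem.Int.floordiv 200 (3 ^ n) := by
  induction n with
  | zero => simp [PySem.List.pyRange_one_eq_nil, PySem.Int.floordiv_eq_ediv_of_pos]
  | succ k ih =>
      have h : ((k : Int) + 1) = (k : Int) + 1 := rfl
      rw [show ((k + 1 : Nat) : Int) = (k : Int) + 1 by push_cast; ring,
          PySem.List.pyRange_one_succ_right (by positivity), List.foldl_append, ih]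
      simp only [List.foldl_cons, List.foldl_nil]
      rw [PySem.Int.floordiv_eq_ediv_of_pos (by positivity),
          PySem.Int.floordiv_eq_ediv_of_pos (by norm_num),
          PySem.Int.floordiv_eq_ediv_of_pos (by positivity),
          Int.ediv_ediv_of_nonneg (by positivity), pow_succ]

theorem determine_distance__py_spec : Claim_equal_determine_distance__py := by
  intro level _
  unfold Spec_determine_distance__py determine_distance__py determine_distance__py_alt
  rcases lt_trichotomy level 0 with h | h | h
  · rw [if_neg (by simpa using h.ne), if_pos h.le,
        PySem.List.pyRange_one_eq_nil h.le]
    rfl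
  · subst h; rfl
  · rw [if_neg (by simpa using h.ne'), if_neg (by omega)]
    have := pv_fold_pow level.toNat
    rwa [Int.toNat_of_nonneg h.le] at this
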